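-- pv_equiv track=rewrite | github.com/k-harada/AtCoder | ABC/ABC101-150/ABC104/B.py | solve
-- ===== SOURCE A (Python) =====
-- def solve(s):
--     # 条件1
--     if s[0] != "A":
--         return "WA"
--     # 条件2
--     c_index = 10
--     for i in range(2, len(s) - 1):
--         if s[i] == "C":
--             # 2つ目を却下
--             if c_index != 10:
--                 return "WA"
--             c_index = i
--     # ない場合を却下
--     if c_index == 10:
--         return "WA"
--     # 条件3
--     for i in range(1, len(s)):
--         if i != c_index and s[i].upper() == s[i]:
--             return "WA"
--     return "AC"
-- ===== SOURCE B (Python) =====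
-- def solve(s):
--     if s[0] != "A":
--         return "WA"
--     up = [i for i in range(1, len(s)) if s[i].upper() == s[i]]
--     if len(up) == 1 and s[up[0]] == "C" and 2 <= up[0] <= len(s) - 2:
--         return "AC"
--     return "WA"
-- ===== Notes on version B (the rewrite author's own statement) =====
-- stated objective: alternative
-- what changed: B fuses A's two differently-ranged scans (sentinel-based unique-'C' search over range(2,len-1), then an uppercase check over range(1,len)) into one pass that collects every position i>=1 whose character equals its upper(), then accepts iff that list is exactly one position j with s[j]=='C' and 2<=j<=len(s)-2.
-- intended difference: On strings of length >= 12 whose only position i>=1 with s[i].upper()==s[i] is a 'C' at index 10 (and s[0]=='A'), A returns 'WA' because index 10 collides with its c_index sentinel value 10, while B returns 'AC', the intended answer since all three stated conditions hold. — e.g. on solve("AabcdefghiCz"): A returns "WA", B returns "AC"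
import Mathlib
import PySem

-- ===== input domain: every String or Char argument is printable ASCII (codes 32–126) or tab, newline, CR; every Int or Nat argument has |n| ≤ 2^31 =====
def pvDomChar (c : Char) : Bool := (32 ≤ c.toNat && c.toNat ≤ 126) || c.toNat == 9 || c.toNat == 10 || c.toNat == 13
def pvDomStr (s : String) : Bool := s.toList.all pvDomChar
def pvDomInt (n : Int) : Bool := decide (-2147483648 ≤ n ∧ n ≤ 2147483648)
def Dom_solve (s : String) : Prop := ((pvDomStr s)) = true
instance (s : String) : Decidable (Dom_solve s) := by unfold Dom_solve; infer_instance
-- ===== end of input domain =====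

-- B fuses A's two differently-ranged scans into one pass that collects all "uppercase" positions
-- and checks the collected list; A = B except on A's c_index=10 sentinel collision (see D_solve).

-- ===== PORT A =====
-- s[i].upper() == s[i] for a single ASCII char
def upEq (c : Char) : Bool := PySem.Chars.upperChar c == c

-- A's first loop over range(2, len(s)-1): none = early `return "WA"`, some c = final c_index
def solveLoopC (l : List Char) : List Int → Int → Option Int
  | [], c => some c
  | i :: rest, c =>
    if PySem.List.pyGetD l i ' ' = 'C' then
      if c ≠ 10 then none else solveLoopC l rest i
    else solveLoopC l rest c

-- A's second loop over range(1, len(s)): false = early `return "WA"`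
def solveLoopU (l : List Char) (cIdx : Int) : List Int → Bool
  | [] => true
  | i :: rest =>
    if i ≠ cIdx ∧ upEq (PySem.List.pyGetD l i ' ') then false
    else solveLoopU l cIdx rest

def solve (s : String) : String :=
  if PySem.List.pyGet? s.toList 0 ≠ some 'A' then "WA"
  else
    match solveLoopC s.toList (PySem.List.pyRange 2 ((s.toList.length : Int) - 1) 1) 10 with
    | none => "WA"
    | some c =>
      if c = 10 then "WA"
      else if solveLoopU s.toList c (PySem.List.pyRange 1 (s.toList.length : Int) 1) then "AC"
      else "WA"

-- ===== PORT B =====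
def solve_alt (s : String) : String :=
  if PySem.List.pyGet? s.toList 0 ≠ some 'A' then "WA"
  else
    match (PySem.List.pyRange 1 (s.toList.length : Int) 1).filter
        (fun i => upEq (PySem.List.pyGetD s.toList i ' ')) with
    | [j] =>
      if PySem.List.pyGetD s.toList j ' ' = 'C' ∧ 2 ≤ j ∧ j ≤ (s.toList.length : Int) - 2 then "AC"
      else "WA"
    | _ => "WA"

-- ===== PRECONDITION & SPEC =====
-- Pre_ excludes only the empty string, on which A's s[0] raises IndexError.
def Pre_solve (s : String) : Prop := s ≠ ""
instance (s : String) : Decidable (Pre_solve s) := by unfold Pre_solve; infer_instance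
def pvWitness_solve : String := "AtCoder"

-- On strings of length ≥ 12 whose only position i ≥ 1 with s[i].upper() == s[i] is a 'C' at index 10
-- (and s[0] == 'A'), A returns "WA" because index 10 collides with its c_index sentinel value 10,
-- while B returns "AC", the intended answer since all three stated conditions hold.
def D_solve (s : String) : Prop :=
  12 ≤ s.toList.length ∧ s.toList[0]? = some 'A' ∧ s.toList[10]? = some 'C' ∧
  ∀ i < s.toList.length, 1 ≤ i → i ≠ 10 →
    PySem.Chars.upperChar (s.toList.getD i ' ') ≠ s.toList.getD i ' '
instance (s : String) : Decidable (D_solve s) := by unfold D_solve; infer_instance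

def Spec_solve (s : String) (out : String) : Prop := ¬ D_solve s → out = solve_alt s
instance (s : String) (out : String) : Decidable (Spec_solve s out) := by unfold Spec_solve; infer_instance

def pvDiffWitness_solve : String := "AabcdefghiCz"
def pvDiffWitnessOut_solve : String × String := ("WA", "AC")

-- ===== CLAIM (what is proved, stated in full; the proofs are below) =====
def Claim_unchanged_solve : Prop := ∀ (s : String), Dom_solve s → Pre_solve s → Spec_solve s (solve s)
def Claim_changed_solve : Prop := Dom_solve (pvDiffWitness_solve) ∧ Pre_solve (pvDiffWitness_solve) ∧ D_solve (pvDiffWitness_solve) ∧ solve (pvDiffWitness_solve) = pvDiffWitnessOut_solve.1 ∧ solve_alt (pvDiffWitness_solve) = pvDiffWitnessOut_solve.2 ∧ pvDiffWitnessOut_solve.1 ≠ pvDiffWitnessOut_solve.2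
def Claim_exact_solve : Prop := ∀ (s : String), Dom_solve s → Pre_solve s → D_solve s → solve s ≠ solve_alt s

-- ===== LEMMAS AND PROOFS =====

-- a nodup list whose every member equals a, containing a, is [a]
theorem pv_nodup_all_eq {α : Type} (xs : List α) (a : α) (hn : xs.Nodup)
    (hmem : a ∈ xs) (hall : ∀ x ∈ xs, x = a) : xs = [a] := by
  cases xs with
  | nil => cases hmem
  | cons x t =>
    cases t with
    | nil =>
      have := hall x (by simp)
      simp [this]
    | cons y t2 =>
      have hx := hall x (by simp)
      have hy := hall y (by simp)
      subst hx; subst hy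
      simp at hn

theorem pv_loopU_iff (l : List Char) (cIdx : Int) (idxs : List Int) :
    solveLoopU l cIdx idxs = true ↔
      ∀ i ∈ idxs, i ≠ cIdx → upEq (PySem.List.pyGetD l i ' ') = false := by
  induction idxs with
  | nil => simp [solveLoopU]
  | cons i rest ih =>
    by_cases h : i ≠ cIdx ∧ upEq (PySem.List.pyGetD l i ' ') = true
    · simp only [solveLoopU, if_pos h]
      constructor
      · intro hfalse; exact absurd hfalse (by simp)
      · intro hall
        exact absurd (hall i (by simp) h.1) (by simp [h.2])
    · simp only [solveLoopU, if_neg h]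
      rw [ih]
      constructor
      · intro hall j hj hne
        rcases List.mem_cons.mp hj with rfl | hj
        · by_cases hu : upEq (PySem.List.pyGetD l j ' ') = true
          · exact absurd ⟨hne, hu⟩ h
          · simpa using hu
        · exact hall j hj hne
      · intro hall j hj hne; exact hall j (by simp [hj]) hne

theorem pv_loopC_nil (l : List Char) (idxs : List Int) (c : Int)
    (h : idxs.filter (fun i => PySem.List.pyGetD l i ' ' == 'C') = []) :
    solveLoopC l idxs c = some c := by
  induction idxs generalizing c with
  | nil => rfl
  | cons i rest ih =>
    simp only [List.filter_cons] at h
    by_cases hc : PySem.List.pyGetD l i ' ' = 'C'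
    · simp [hc] at h
    · simp only [solveLoopC, if_neg hc]
      exact ih c (by simpa [hc] using h)

theorem pv_loopC_singleton (l : List Char) (idxs : List Int) (j : Int) (hj : j ≠ 10)
    (h : idxs.filter (fun i => PySem.List.pyGetD l i ' ' == 'C') = [j]) :
    solveLoopC l idxs 10 = some j := by
  induction idxs with
  | nil => simp at h
  | cons i rest ih =>
    simp only [List.filter_cons] at h
    by_cases hc : PySem.List.pyGetD l i ' ' = 'C'
    · simp only [hc, beq_self_eq_true, if_pos] at h
      obtain ⟨rfl, hrest⟩ : i = j ∧ rest.filter (fun i => PySem.List.pyGetD l i ' ' == 'C') = [] := by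
        simpa using h
      simp only [solveLoopC, if_pos hc]
      rw [if_neg (by simp)]
      exact pv_loopC_nil l rest _ hrest
    · simp only [solveLoopC, if_neg hc]
      exact ih (by simpa [hc] using h)

theorem pv_loopC_some (l : List Char) (idxs : List Int) (c0 c : Int)
    (h : solveLoopC l idxs c0 = some c) :
    c = c0 ∨ c ∈ idxs.filter (fun i => PySem.List.pyGetD l i ' ' == 'C') := by
  induction idxs generalizing c0 with
  | nil =>
    left
    simpa [solveLoopC] using h.symm
  | cons i rest ih =>
    simp only [List.filter_cons]
    by_cases hc : PySem.List.pyGetD l i ' ' = 'C'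
    · simp only [solveLoopC, if_pos hc] at h
      by_cases h10 : c0 = 10
      · rw [if_neg (by simp [h10])] at h
        rcases ih i h with rfl | hmem
        · right; simp [hc]
        · right; simp [hc, hmem]
      · simp [h10] at h
    · simp only [solveLoopC, if_neg hc] at h
      rcases ih c0 h with rfl | hmem
      · left; rfl
      · right; simpa [hc] using hmem

-- the fused characterization: A's loop pipeline accepts iff B's collected list is [j], s[j]='C',
-- 2 ≤ j ≤ n-2, and j ≠ 10
theorem pv_AC_iff (l : List Char) :
    (∃ c, solveLoopC l (PySem.List.pyRange 2 ((l.length : Int) - 1) 1) 10 = some c ∧ c ≠ 10 ∧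
       solveLoopU l c (PySem.List.pyRange 1 (l.length : Int) 1) = true)
    ↔ (∃ j, (PySem.List.pyRange 1 (l.length : Int) 1).filter
          (fun i => upEq (PySem.List.pyGetD l i ' ')) = [j] ∧
        PySem.List.pyGetD l j ' ' = 'C' ∧ 2 ≤ j ∧ j ≤ (l.length : Int) - 2 ∧ j ≠ 10) := by
  constructor
  · rintro ⟨c, hres, h10, hU⟩
    rcases pv_loopC_some l _ 10 c hres with rfl | hmem
    · exact absurd rfl h10
    · rw [List.mem_filter] at hmem
      obtain ⟨hrange, hCb⟩ := hmem
      have hC : PySem.List.pyGetD l c ' ' = 'C' := by simpa using hCb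
      rw [PySem.List.mem_pyRange_one] at hrange
      have hcup : upEq (PySem.List.pyGetD l c ' ') = true := by rw [hC]; decide
      refine ⟨c, ?_, hC, hrange.1, by omega, h10⟩
      apply pv_nodup_all_eq
      · exact (PySem.List.nodup_pyRange_one 1 ((l.length : Int))).filter _
      · rw [List.mem_filter, PySem.List.mem_pyRange_one]
        exact ⟨⟨by omega, by omega⟩, hcup⟩
      · intro x hx
        rw [List.mem_filter] at hx
        by_contra hne
        have := (pv_loopU_iff l c _).mp hU x hx.1 hne
        simp [this] at hx
  · rintro ⟨j, hup, hC, h2, hn2, h10⟩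
    have hnlen : j < (l.length : Int) - 1 := by omega
    have hfe : (PySem.List.pyRange 2 ((l.length : Int) - 1) 1).filter
        (fun i => PySem.List.pyGetD l i ' ' == 'C') = [j] := by
      apply pv_nodup_all_eq
      · exact (PySem.List.nodup_pyRange_one 2 ((l.length : Int) - 1)).filter _
      · rw [List.mem_filter, PySem.List.mem_pyRange_one]
        exact ⟨⟨h2, hnlen⟩, by simp [hC]⟩
      · intro x hx
        rw [List.mem_filter, PySem.List.mem_pyRange_one] at hx
        obtain ⟨⟨hx1, hx2⟩, hxC⟩ := hx
        have hxc : PySem.List.pyGetD l x ' ' = 'C' := by simpa using hxC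
        have hxup : x ∈ (PySem.List.pyRange 1 ((l.length : Int)) 1).filter
            (fun i => upEq (PySem.List.pyGetD l i ' ')) := by
          rw [List.mem_filter, PySem.List.mem_pyRange_one]
          exact ⟨⟨by omega, by omega⟩, by rw [hxc]; decide⟩
        rw [hup] at hxup; simpa using hxup
    refine ⟨j, pv_loopC_singleton l _ j h10 hfe, h10, ?_⟩
    rw [pv_loopU_iff]
    intro i hi hne
    by_contra hu
    have hiu : i ∈ (PySem.List.pyRange 1 ((l.length : Int)) 1).filter
        (fun i => upEq (PySem.List.pyGetD l i ' ')) :=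
      List.mem_filter.mpr ⟨hi, by simpa using hu⟩
    rw [hup] at hiu
    exact hne (by simpa using hiu)

theorem pv_solve_cases (s : String) : solve s = "AC" ∨ solve s = "WA" := by
  unfold solve
  split
  · exact Or.inr rfl
  · split
    · exact Or.inr rfl
    · split
      · exact Or.inr rfl
      · split
        · exact Or.inl rfl
        · exact Or.inr rfl

theorem pv_alt_cases (s : String) : solve_alt s = "AC" ∨ solve_alt s = "WA" := by
  unfold solve_alt
  split
  · exact Or.inr rfl
  · split
    · split
      · exact Or.inl rfl
      · exact Or.inr rfl
    · exact Or.inr rfl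

theorem pv_solve_AC_iff (s : String) (hA : PySem.List.pyGet? s.toList 0 = some 'A') :
    solve s = "AC" ↔
      (∃ c, solveLoopC s.toList (PySem.List.pyRange 2 ((s.toList.length : Int) - 1) 1) 10 = some c ∧
        c ≠ 10 ∧ solveLoopU s.toList c (PySem.List.pyRange 1 (s.toList.length : Int) 1) = true) := by
  unfold solve
  rw [if_neg (by simp [hA])]
  rcases hres : solveLoopC s.toList (PySem.List.pyRange 2 ((s.toList.length : Int) - 1) 1) 10
      with _ | c
  · simp
  · dsimp only
    by_cases h10 : c = 10
    · subst h10
      rw [if_pos rfl]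
      simp
    · rw [if_neg h10]
      by_cases hU : solveLoopU s.toList c (PySem.List.pyRange 1 (s.toList.length : Int) 1) = true
      · rw [if_pos hU]
        exact iff_of_true rfl ⟨c, rfl, h10, hU⟩
      · rw [if_neg hU]
        constructor
        · intro h; exact absurd h (by decide)
        · rintro ⟨c', hres', h10', hU'⟩
          obtain rfl : c = c' := by simpa using hres'
          exact absurd hU' hU

theorem pv_alt_AC_iff (s : String) (hA : PySem.List.pyGet? s.toList 0 = some 'A') :
    solve_alt s = "AC" ↔
      (∃ j, (PySem.List.pyRange 1 (s.toList.length : Int) 1).filter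
          (fun i => upEq (PySem.List.pyGetD s.toList i ' ')) = [j] ∧
        PySem.List.pyGetD s.toList j ' ' = 'C' ∧ 2 ≤ j ∧ j ≤ (s.toList.length : Int) - 2) := by
  unfold solve_alt
  rw [if_neg (by simp [hA])]
  rcases hup : (PySem.List.pyRange 1 (s.toList.length : Int) 1).filter
      (fun i => upEq (PySem.List.pyGetD s.toList i ' ')) with _ | ⟨j, _ | ⟨k, t⟩⟩
  · simp
  · dsimp only
    by_cases hc : PySem.List.pyGetD s.toList j ' ' = 'C' ∧ 2 ≤ j ∧ j ≤ (s.toList.length : Int) - 2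
    · rw [if_pos hc]
      exact iff_of_true rfl ⟨j, rfl, hc.1, hc.2.1, hc.2.2⟩
    · rw [if_neg hc]
      constructor
      · intro h; exact absurd h (by decide)
      · rintro ⟨j', hup', h1, h2, h3⟩
        obtain rfl : j = j' := by simpa using hup'
        exact absurd ⟨h1, h2, h3⟩ hc
  · dsimp only
    constructor
    · intro h; simp at h
    · rintro ⟨j', hup', -⟩
      simp at hup'

theorem pv_D_up (s : String) (hd : D_solve s) :
    (PySem.List.pyRange 1 (s.toList.length : Int) 1).filter
      (fun i => upEq (PySem.List.pyGetD s.toList i ' ')) = [(10 : Int)] := by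
  obtain ⟨hlen, hA0, hC10, hup⟩ := hd
  have hC : s.toList.getD 10 ' ' = 'C' := by
    rw [List.getD_eq_getElem?_getD, hC10]; rfl
  apply pv_nodup_all_eq
  · exact (PySem.List.nodup_pyRange_one 1 ((s.toList.length : Int))).filter _
  · rw [List.mem_filter, PySem.List.mem_pyRange_one]
    refine ⟨⟨by omega, by omega⟩, ?_⟩
    rw [show (10 : Int) = ((10 : Nat) : Int) from by norm_num, PySem.List.pyGetD_natCast, hC]
    decide
  · intro x hx
    rw [List.mem_filter, PySem.List.mem_pyRange_one] at hx
    obtain ⟨⟨hx1, hx2⟩, hxu⟩ := hx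
    by_contra hne
    have hxcast : x = ((x.toNat : Nat) : Int) := by omega
    rw [hxcast, PySem.List.pyGetD_natCast] at hxu
    exact hup x.toNat (by omega) (by omega) (by omega) (by simpa [upEq] using hxu)

-- if B accepts with the unique position j = 10, then D_solve holds
theorem pv_alt_ten_D (s : String) (hA : PySem.List.pyGet? s.toList 0 = some 'A')
    (hup : (PySem.List.pyRange 1 (s.toList.length : Int) 1).filter
        (fun i => upEq (PySem.List.pyGetD s.toList i ' ')) = [(10 : Int)])
    (hC : PySem.List.pyGetD s.toList 10 ' ' = 'C') (hn : (10 : Int) ≤ (s.toList.length : Int) - 2) :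
    D_solve s := by
  have hlen : 12 ≤ s.toList.length := by omega
  have h10n : (10 : Nat) < s.toList.length := by omega
  rw [show (10 : Int) = ((10 : Nat) : Int) from by norm_num, PySem.List.pyGetD_natCast] at hC
  refine ⟨hlen, by rw [← PySem.List.pyGet?_zero]; exact hA, ?_, ?_⟩
  · rw [List.getElem?_eq_getElem h10n, ← List.getD_eq_getElem s.toList ' ' h10n, hC]
  · intro i hilt hi1 hi10 heq
    have hiu : ((i : Nat) : Int) ∈ (PySem.List.pyRange 1 (s.toList.length : Int) 1).filter
        (fun k => upEq (PySem.List.pyGetD s.toList k ' ')) := by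
      rw [List.mem_filter, PySem.List.mem_pyRange_one]
      refine ⟨⟨by omega, by omega⟩, ?_⟩
      rw [PySem.List.pyGetD_natCast]
      simp only [upEq, beq_iff_eq]
      exact heq
    rw [hup] at hiu
    have : ((i : Nat) : Int) = 10 := by simpa using hiu
    exact hi10 (by omega)

theorem pv_D_alt (s : String) (hd : D_solve s) : solve_alt s = "AC" := by
  have hA : PySem.List.pyGet? s.toList 0 = some 'A' := by
    rw [PySem.List.pyGet?_zero]; exact hd.2.1
  have hup := pv_D_up s hd
  obtain ⟨hlen, -, hC10, -⟩ := hd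
  rw [pv_alt_AC_iff s hA]
  refine ⟨10, hup, ?_, by norm_num, by omega⟩
  rw [show (10 : Int) = ((10 : Nat) : Int) from by norm_num, PySem.List.pyGetD_natCast,
    List.getD_eq_getElem?_getD, hC10]
  rfl

theorem pv_D_solve_WA (s : String) (hd : D_solve s) : solve s = "WA" := by
  rcases pv_solve_cases s with hac | hwa
  · exfalso
    have hA : PySem.List.pyGet? s.toList 0 = some 'A' := by
      rw [PySem.List.pyGet?_zero]; exact hd.2.1
    obtain ⟨j, hup', hC, h2, hn2, h10⟩ := (pv_AC_iff s.toList).mp ((pv_solve_AC_iff s hA).mp hac)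
    rw [pv_D_up s hd] at hup'
    have h10j : (10 : Int) = j := by simpa using hup'
    exact h10 h10j.symm
  · exact hwa

-- ===== VERDICT (by name: the statement is the Claim_ definition above) =====
theorem solve_spec : Claim_unchanged_solve := by
  intro s _ _ hnd
  by_cases hA : PySem.List.pyGet? s.toList 0 = some 'A'
  · rcases pv_solve_cases s with hac | hwa
    · obtain ⟨j, hup, hC, h2, hn2, h10⟩ := (pv_AC_iff s.toList).mp ((pv_solve_AC_iff s hA).mp hac)
      rw [hac, ((pv_alt_AC_iff s hA).mpr ⟨j, hup, hC, h2, hn2⟩)]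
    · rcases pv_alt_cases s with hac' | hwa'
      · obtain ⟨j, hup, hC, h2, hn2⟩ := (pv_alt_AC_iff s hA).mp hac'
        have h10 : j ≠ 10 := by
          rintro rfl
          exact hnd (pv_alt_ten_D s hA hup hC hn2)
        have : solve s = "AC" :=
          (pv_solve_AC_iff s hA).mpr ((pv_AC_iff s.toList).mpr ⟨j, hup, hC, h2, hn2, h10⟩)
        rw [this] at hwa
        simp at hwa
      · rw [hwa, hwa']
  · unfold solve solve_alt
    rw [if_pos hA, if_pos hA]

theorem solve_changed : Claim_changed_solve := by
  unfold Claim_changed_solve; decide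

theorem solve_tight : Claim_exact_solve := by
  intro s _ _ hd
  rw [pv_D_solve_WA s hd, pv_D_alt s hd]
  decide
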